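-- pv_equiv track=rewrite | github.com/usefulmove/cp | leetcode/3852.py | minDistinctFreqPair
-- ===== SOURCE A (Python) =====
-- from collections import Counter
--
-- def minDistinctFreqPair(nums: list[int]) -> list[int]:
--     cnts = sorted(Counter(nums).items(), key=lambda pair: pair[0])
--     n = len(cnts)
--
--     for a in range(n-1):
--         for b in range(a+1, n):
--             if cnts[a][1] != cnts[b][1]:
--                 return [cnts[a][0], cnts[b][0]]
--
--     return [-1, -1]
-- ===== SOURCE B (Python) =====
-- from collections import Counter
--
-- def minDistinctFreqPair(nums: list[int]) -> list[int]:
--     cnts = sorted(Counter(nums).items(), key=lambda pair: pair[0])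
--     if not cnts:
--         return [-1, -1]
--     k0, c0 = cnts[0]
--     for k, c in cnts[1:]:
--         if c != c0:
--             return [k0, k]
--     return [-1, -1]
-- ===== Notes on version B (the rewrite author's own statement) =====
-- stated objective: simpler
-- what changed: Replaces A's nested pair scan over all (a,b) index pairs with a single pass comparing each frequency to the first sorted key's frequency: if the first key's frequency matches every other, all frequencies are equal and A's later outer iterations can never find a mismatch either.
import Mathlib
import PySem

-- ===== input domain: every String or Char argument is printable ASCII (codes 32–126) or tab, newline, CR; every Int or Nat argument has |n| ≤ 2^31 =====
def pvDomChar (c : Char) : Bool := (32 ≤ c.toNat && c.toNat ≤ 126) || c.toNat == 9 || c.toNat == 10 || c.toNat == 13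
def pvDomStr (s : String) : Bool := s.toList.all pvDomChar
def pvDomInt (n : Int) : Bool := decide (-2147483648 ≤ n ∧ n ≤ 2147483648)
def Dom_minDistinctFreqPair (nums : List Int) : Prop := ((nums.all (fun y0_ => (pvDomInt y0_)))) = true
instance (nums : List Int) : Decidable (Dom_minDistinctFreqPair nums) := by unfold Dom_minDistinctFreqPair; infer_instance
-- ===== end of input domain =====

-- B replaces A's nested pair scan with a single pass comparing each frequency to the
-- first sorted key's frequency (simpler: one loop instead of two nested ones).

-- ===== PORT A =====
-- inner loop: for b in range(a+1, n): first cnts[b] whose count differs from cnts[a]'s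
def pvInnerA (a : Int × Int) : List (Int × Int) → Option (List Int)
  | [] => none
  | b :: rest => if a.2 ≠ b.2 then some [a.1, b.1] else pvInnerA a rest

-- outer loop: for a in range(n-1)
def pvOuterA : List (Int × Int) → List Int
  | [] => [-1, -1]
  | a :: rest =>
    match pvInnerA a rest with
    | some r => r
    | none => pvOuterA rest

def minDistinctFreqPair (nums : List Int) : List Int :=
  pvOuterA (PySem.List.sorted (PySem.Dict.counter nums).items (fun pair => pair.1) false)

-- ===== PORT B =====
-- for (k, c) in cnts[1:]: first c differing from c0
def pvScanB (k0 c0 : Int) : List (Int × Int) → List Int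
  | [] => [-1, -1]
  | (k, c) :: rest => if c ≠ c0 then [k0, k] else pvScanB k0 c0 rest

def minDistinctFreqPair_alt (nums : List Int) : List Int :=
  match PySem.List.sorted (PySem.Dict.counter nums).items (fun pair => pair.1) false with
  | [] => [-1, -1]
  | (k0, c0) :: rest => pvScanB k0 c0 rest

-- ===== PRECONDITION & SPEC =====
def Spec_minDistinctFreqPair (nums : List Int) (out : List Int) : Prop := out = minDistinctFreqPair_alt nums
instance (nums : List Int) (out : List Int) : Decidable (Spec_minDistinctFreqPair nums out) := by unfold Spec_minDistinctFreqPair; infer_instance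

-- ===== CLAIM (what is proved, stated in full; the proofs are below) =====
def Claim_equal_minDistinctFreqPair : Prop := ∀ (nums : List Int), Dom_minDistinctFreqPair nums → Spec_minDistinctFreqPair nums (minDistinctFreqPair nums)

-- ===== LEMMAS AND PROOFS =====

-- if the inner scan from a finds no mismatch, every later count equals a's count
theorem pvInnerA_none : ∀ {l : List (Int × Int)} {a : Int × Int},
    pvInnerA a l = none → ∀ b ∈ l, b.2 = a.2 := by
  intro l
  induction l with
  | nil => intro a _ b hb; cases hb
  | cons x rest ih =>
    intro a h b hb
    by_cases hx : a.2 ≠ x.2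
    · simp [pvInnerA, hx] at h
    · simp only [ne_eq, not_not] at hx
      have h' : pvInnerA a rest = none := by
        simpa [pvInnerA, hx] using h
      rcases List.mem_cons.mp hb with rfl | hb
      · exact hx.symm
      · exact ih h' b hb

-- a scan over all-equal counts finds no mismatch
theorem pvInnerA_none_of_const {c : Int} : ∀ {l : List (Int × Int)} {a : Int × Int},
    a.2 = c → (∀ b ∈ l, b.2 = c) → pvInnerA a l = none := by
  intro l
  induction l with
  | nil => intro a _ _; rfl
  | cons x rest ih =>
    intro a ha h
    have hx : x.2 = c := h x (by simp)
    simp only [pvInnerA, ha, hx, ne_eq, not_true_eq_false, if_false]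
    exact ih ha (fun b hb => h b (by simp [hb]))

-- on a list of all-equal counts, A's outer loop never finds a mismatch
theorem pvOuterA_const {c : Int} : ∀ {l : List (Int × Int)},
    (∀ b ∈ l, b.2 = c) → pvOuterA l = [-1, -1] := by
  intro l
  induction l with
  | nil => intro _; rfl
  | cons x rest ih =>
    intro h
    have hinner : pvInnerA x rest = none :=
      pvInnerA_none_of_const (h x (by simp)) (fun b hb => h b (by simp [hb]))
    simp only [pvOuterA, hinner]
    exact ih (fun b hb => h b (by simp [hb]))

-- B's scan computes A's first-row inner scan, with [-1,-1] on no mismatch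
theorem pvScanB_eq (a : Int × Int) (l : List (Int × Int)) :
    pvScanB a.1 a.2 l = (match pvInnerA a l with | some r => r | none => [-1, -1]) := by
  induction l with
  | nil => rfl
  | cons x rest ih =>
    by_cases hx : x.2 ≠ a.2
    · simp [pvScanB, pvInnerA, hx, (Ne.symm hx)]
    · simp only [ne_eq, not_not] at hx
      simp [pvScanB, pvInnerA, hx, ih]

theorem pvOuterA_eq_scan (l : List (Int × Int)) :
    pvOuterA l = (match l with | [] => [-1, -1] | (k0, c0) :: rest => pvScanB k0 c0 rest) := by
  cases l with
  | nil => rfl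
  | cons a rest =>
    obtain ⟨k0, c0⟩ := a
    show pvOuterA ((k0, c0) :: rest) = pvScanB k0 c0 rest
    rw [show pvScanB k0 c0 rest = pvScanB (k0, c0).1 (k0, c0).2 rest from rfl,
        pvScanB_eq (k0, c0) rest]
    cases h : pvInnerA (k0, c0) rest with
    | some r => simp [pvOuterA, h]
    | none =>
      simp only [pvOuterA, h]
      exact pvOuterA_const (pvInnerA_none h)

-- ===== VERDICT (by name: the statement is the Claim_ definition above) =====
theorem minDistinctFreqPair_spec : Claim_equal_minDistinctFreqPair := by
  intro nums _
  unfold Spec_minDistinctFreqPair minDistinctFreqPair minDistinctFreqPair_alt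
  exact pvOuterA_eq_scan _
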